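-- pv_equiv track=rewrite | github.com/Jiahuiche/SBC-MENU | api_clips.py | is_kosher_ingredient
-- ===== SOURCE A (Python) =====
-- def is_kosher_ingredient(ingredient_name):
--     """Check if an ingredient is kosher-friendly by checking each word"""
--     non_kosher_words = {
--         'pork', 'bacon', 'ham', 'lard', 'sausage','shellfish', 'shrimp', 'lobster', 'crab',
--         'clam', 'oyster', 'mussel', 'scallop', 'catfish', 'eel', 'shark',
--         'gelatin', 'rennet', 'lard','ray', 'gelatin', 'rennet', 'vanilla extract', 'worcestershire sauce'
--     }
--     ingredient_lower = ingredient_name.lower()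
--     # Tokenize the ingredient name into individual words
--     words = ingredient_lower.split()
--
--     # Check if any word matches non-kosher ingredients
--     for word in words:
--         if word in non_kosher_words:
--             return False
--
--     for term in non_kosher_words:
--         if term in ingredient_lower:
--             return False
--
--     return True
-- ===== SOURCE B (Python) =====
-- def is_kosher_ingredient(ingredient_name):
--     """Check if an ingredient is kosher-friendly with one left-to-right scan"""
--     terms = ('pork', 'bacon', 'ham', 'lard', 'sausage', 'shellfish', 'shrimp',
--              'lobster', 'crab', 'clam', 'oyster', 'mussel', 'scallop', 'catfish',
--              'eel', 'shark', 'gelatin', 'rennet', 'ray', 'vanilla extract',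
--              'worcestershire sauce')
--     s = ingredient_name.lower()
--     for i in range(len(s)):
--         if s.startswith(terms, i):
--             return False
--     return True
-- ===== Notes on version B (the rewrite author's own statement) =====
-- stated objective: alternative
-- what changed: A lowercases, splits into words and checks each word against the set, then scans the whole lowered string once per term; B drops the redundant word pass and does a single left-to-right scan over the positions of the lowered string, testing whether any term starts at the current position.
import Mathlib
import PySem

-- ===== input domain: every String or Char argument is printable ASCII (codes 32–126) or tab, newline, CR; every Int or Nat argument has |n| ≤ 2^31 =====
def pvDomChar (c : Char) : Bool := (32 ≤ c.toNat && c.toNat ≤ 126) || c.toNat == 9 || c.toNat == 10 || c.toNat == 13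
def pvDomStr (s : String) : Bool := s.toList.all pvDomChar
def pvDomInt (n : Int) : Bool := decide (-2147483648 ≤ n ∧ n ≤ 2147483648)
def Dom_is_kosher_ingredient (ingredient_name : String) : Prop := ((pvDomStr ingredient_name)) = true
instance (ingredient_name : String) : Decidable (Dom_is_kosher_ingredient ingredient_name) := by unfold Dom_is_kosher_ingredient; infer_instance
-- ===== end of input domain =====

-- B replaces A's word-split pass + per-term substring scans by a single left-to-right
-- positional scan of the lowered string (alternative decomposition, same asymptotic cost).


-- ===== PORT A =====
-- the set literal of A, in source order, duplicates included (Python set dedups to first occurrence)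
def pvATermsSrc : List String :=
  ["pork", "bacon", "ham", "lard", "sausage", "shellfish", "shrimp", "lobster", "crab",
   "clam", "oyster", "mussel", "scallop", "catfish", "eel", "shark",
   "gelatin", "rennet", "lard", "ray", "gelatin", "rennet", "vanilla extract", "worcestershire sauce"]

def is_kosher_ingredient (ingredient_name : String) : Bool :=
  let non_kosher_words : PySem.Set String := PySem.Set.ofList pvATermsSrc
  let ingredient_lower := PySem.Str.lower ingredient_name
  let words := PySem.Str.split₀ ingredient_lower
  -- for word in words: if word in non_kosher_words: return False
  if words.any (fun word => PySem.Set.contains non_kosher_words word) then false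
  -- for term in non_kosher_words: if term in ingredient_lower: return False
  else if non_kosher_words.any (fun term => PySem.Str.isIn term ingredient_lower) then false
  else true

-- ===== PORT B =====
-- B's tuple of terms (already distinct, same order as first occurrences in A's literal)
def pvBTerms : List String :=
  ["pork", "bacon", "ham", "lard", "sausage", "shellfish", "shrimp", "lobster", "crab",
   "clam", "oyster", "mussel", "scallop", "catfish", "eel", "shark",
   "gelatin", "rennet", "ray", "vanilla extract", "worcestershire sauce"]

-- for i in range(len(s)): if any(s.startswith(t, i) for t in terms): return False — scan over suffixes
def pvScan : List Char → Bool
  | [] => true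
  | c :: rest =>
      if pvBTerms.any (fun t => PySem.Chars.startswith (c :: rest) t.toList) then false
      else pvScan rest

def is_kosher_ingredient_alt (ingredient_name : String) : Bool :=
  pvScan (PySem.Str.lower ingredient_name).toList

-- ===== PRECONDITION & SPEC =====
def Spec_is_kosher_ingredient (ingredient_name : String) (out : Bool) : Prop := out = is_kosher_ingredient_alt ingredient_name
instance (ingredient_name : String) (out : Bool) : Decidable (Spec_is_kosher_ingredient ingredient_name out) := by unfold Spec_is_kosher_ingredient; infer_instance

-- ===== CLAIM (what is proved, stated in full; the proofs are below) =====
def Claim_equal_is_kosher_ingredient : Prop := ∀ (ingredient_name : String), Dom_is_kosher_ingredient ingredient_name → Spec_is_kosher_ingredient ingredient_name (is_kosher_ingredient ingredient_name)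

-- ===== LEMMAS AND PROOFS =====

-- A's set literal dedups to exactly B's term list
theorem pvSet_eq : PySem.Set.ofList pvATermsSrc = pvBTerms := by decide

-- no term is the empty string
theorem pvBTerms_ne_nil : ∀ t ∈ pvBTerms, t.toList ≠ [] := by decide

-- every piece produced by split₀.go is in acc, or the pending word extended by a prefix
-- of the remaining input, or an infix of the remaining input
theorem split₀_go_infix : ∀ (s cur : List Char) (acc : List (List Char)) (w : List Char),
    w ∈ PySem.Chars.split₀.go s cur acc →
    w ∈ acc ∨ (∃ p, p <+: s ∧ w = cur.reverse ++ p) ∨ w <:+: s := by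
  intro s
  induction s with
  | nil =>
      intro cur acc w hw
      simp only [PySem.Chars.split₀.go] at hw
      split at hw
      · left; exact List.mem_reverse.mp hw
      · rw [List.mem_reverse, List.mem_cons] at hw
        rcases hw with rfl | h
        · right; left; exact ⟨[], List.nil_prefix, by simp⟩
        · left; exact h
  | cons c rest ih =>
      intro cur acc w hw
      simp only [PySem.Chars.split₀.go] at hw
      split at hw
      · split at hw
        · rcases ih [] acc w hw with h | ⟨p, hp, hw'⟩ | h
          · left; exact h
          · right; right
            have : w = p := by simpa using hw'
            subst this
            exact List.infix_cons_iff.mpr (Or.inr hp.isInfix)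
          · right; right; exact List.infix_cons_iff.mpr (Or.inr h)
        · rcases ih [] (cur.reverse :: acc) w hw with h | ⟨p, hp, hw'⟩ | h
          · rw [List.mem_cons] at h
            rcases h with rfl | h
            · right; left; exact ⟨[], List.nil_prefix, by simp⟩
            · left; exact h
          · right; right
            have : w = p := by simpa using hw'
            subst this
            exact List.infix_cons_iff.mpr (Or.inr hp.isInfix)
          · right; right; exact List.infix_cons_iff.mpr (Or.inr h)
      · rcases ih (c :: cur) acc w hw with h | ⟨p, hp, hw'⟩ | h
        · left; exact h
        · right; left
          refine ⟨c :: p, List.cons_prefix_cons.mpr ⟨rfl, hp⟩, ?_⟩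
          simp [hw', List.append_assoc]
        · right; right; exact List.infix_cons_iff.mpr (Or.inr h)

-- hence every word of split₀ is an infix of the input
theorem split₀_infix (cs : List Char) (w : List Char)
    (hw : w ∈ PySem.Chars.split₀ cs) : w <:+: cs := by
  have h := split₀_go_infix cs [] [] w (by simpa [PySem.Chars.split₀] using hw)
  rcases h with h | ⟨p, hp, hw'⟩ | h
  · simp at h
  · have : w = p := by simpa using hw'
    subst this
    exact hp.isInfix
  · exact h

-- B's scan returns true exactly when no term occurs as an infix
theorem pvScan_iff (cs : List Char) :
    pvScan cs = true ↔ ∀ t ∈ pvBTerms, ¬ t.toList <:+: cs := by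
  induction cs with
  | nil =>
      simp only [pvScan, true_iff]
      intro t ht h
      rw [List.infix_nil] at h
      exact pvBTerms_ne_nil t ht h
  | cons c rest ih =>
      simp only [pvScan]
      split
      · rename_i hany
        simp only [Bool.false_eq_true, false_iff]
        intro hall
        rcases List.any_eq_true.mp hany with ⟨t, ht, hs⟩
        have hpre : t.toList <+: c :: rest := (PySem.Chars.startswith_iff _ _).mp hs
        exact hall t ht (List.infix_cons_iff.mpr (Or.inl hpre))
      · rename_i hany
        rw [ih]
        constructor
        · intro h t ht hinf
          rcases List.infix_cons_iff.mp hinf with hpre | hinf'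
          · apply hany
            refine List.any_eq_true.mpr ⟨t, ht, ?_⟩
            rw [PySem.Chars.startswith_iff]
            exact hpre
          · exact h t ht hinf'
        · intro h t ht hinf
          exact h t ht (List.infix_cons_iff.mpr (Or.inr hinf))

-- ===== VERDICT (by name: the statement is the Claim_ definition above) =====
theorem is_kosher_ingredient_spec : Claim_equal_is_kosher_ingredient := by
  intro s _
  unfold Spec_is_kosher_ingredient is_kosher_ingredient is_kosher_ingredient_alt
  rw [pvSet_eq]
  set lcs := PySem.Str.lower s with hlcs
  by_cases hB : pvScan lcs.toList = true
  · have hno := (pvScan_iff lcs.toList).mp hB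
    have h1' : ∀ w ∈ PySem.Str.split₀ lcs, w ∉ pvBTerms := by
      intro w hw hmem
      apply hno w hmem
      apply split₀_infix
      rw [← PySem.Str.split₀_map_toList]
      exact List.mem_map_of_mem hw
    have h2' : ∀ t ∈ pvBTerms, PySem.Chars.isIn t.toList lcs.toList = false := by
      intro t ht
      rw [PySem.Chars.isIn_eq_false_iff]
      exact hno t ht
    simp only [hB]
    simp
    exact ⟨h1', h2'⟩
  · have hB' : pvScan lcs.toList = false := Bool.eq_false_iff.mpr hB
    have hocc : ∃ t ∈ pvBTerms, t.toList <:+: lcs.toList := by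
      by_contra hcon
      push Not at hcon
      exact hB ((pvScan_iff lcs.toList).mpr hcon)
    rcases hocc with ⟨t, ht, hinf⟩
    have h2c : (pvBTerms.any fun term => PySem.Chars.isIn term.toList lcs.toList) = true := by
      refine List.any_eq_true.mpr ⟨t, ht, ?_⟩
      rw [PySem.Chars.isIn_iff_infix]
      exact hinf
    rw [hB']
    by_cases hc : ((PySem.Str.split₀ lcs).any fun word => PySem.Set.contains pvBTerms word) = true
    · simp
      intro _
      simpa using List.any_eq_true.mp h2c
    · simp only [Bool.not_eq_true] at hc
      simp [h2c]
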